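-- pv_equiv track=rewrite | github.com/Levi-cell/JornadaPython | PythonZero/Module1/Tasks to consolidate learning/SimpleTasks.py | separateEvenOdd
-- ===== SOURCE A (Python) =====
-- def separateEvenOdd(numbers):
--     evenNumbers = []
--     oddNumbers = []
--     sumOfEvenNumbers = 0
--     sumOfOddNumbers = 0
--
--     for number in numbers:
--         if number % 2 == 0:
--             evenNumbers.append(number)
--             sumOfEvenNumbers += number
--         else:
--             oddNumbers.append(number)
--             sumOfOddNumbers += number
--
--     return evenNumbers, oddNumbers, sumOfEvenNumbers, sumOfOddNumbers
-- ===== SOURCE B (Python) =====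
-- def separateEvenOdd(numbers):
--     evenNumbers = [n for n in numbers if n % 2 == 0]
--     oddNumbers = [n for n in numbers if n % 2 != 0]
--     return evenNumbers, oddNumbers, sum(evenNumbers), sum(oddNumbers)
-- ===== Notes on version B (the rewrite author's own statement) =====
-- stated objective: simpler
-- what changed: Replaces the single fused loop with four accumulators by two filter passes that build the even/odd lists and two sum() aggregate passes over those lists.
import Mathlib
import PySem

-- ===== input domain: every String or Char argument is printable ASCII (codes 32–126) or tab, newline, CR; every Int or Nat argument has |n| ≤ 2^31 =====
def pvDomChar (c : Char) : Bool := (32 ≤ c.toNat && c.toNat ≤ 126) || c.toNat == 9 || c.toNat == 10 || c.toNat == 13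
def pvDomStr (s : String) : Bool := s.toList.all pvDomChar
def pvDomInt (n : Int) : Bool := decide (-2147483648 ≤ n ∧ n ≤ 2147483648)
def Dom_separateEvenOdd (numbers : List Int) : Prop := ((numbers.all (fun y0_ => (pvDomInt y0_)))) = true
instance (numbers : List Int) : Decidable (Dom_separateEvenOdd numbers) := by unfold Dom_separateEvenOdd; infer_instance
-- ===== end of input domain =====

-- B replaces A's fused loop with two filter passes plus two sum passes (objective: simpler).


-- ===== PORT A =====
-- A: one loop, appending each number and adding it to the matching running sum.
def separateEvenOdd (numbers : List Int) : List Int × List Int × Int × Int :=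
  numbers.foldl
    (fun (st : List Int × List Int × Int × Int) number =>
      if PySem.Int.mod number 2 = 0 then
        (st.1 ++ [number], st.2.1, st.2.2.1 + number, st.2.2.2)
      else
        (st.1, st.2.1 ++ [number], st.2.2.1, st.2.2.2 + number))
    ([], [], 0, 0)

-- ===== PORT B =====
-- B: two filter passes, then sum() over each built list.
def separateEvenOdd_alt (numbers : List Int) : List Int × List Int × Int × Int :=
  let evenNumbers := numbers.filter (fun n => PySem.Int.mod n 2 = 0)
  let oddNumbers := numbers.filter (fun n => PySem.Int.mod n 2 ≠ 0)
  (evenNumbers, oddNumbers, evenNumbers.foldl (· + ·) 0, oddNumbers.foldl (· + ·) 0)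

-- ===== PRECONDITION & SPEC =====
def Spec_separateEvenOdd (numbers : List Int) (out : List Int × List Int × Int × Int) : Prop := out = separateEvenOdd_alt numbers
instance (numbers : List Int) (out : List Int × List Int × Int × Int) : Decidable (Spec_separateEvenOdd numbers out) := by unfold Spec_separateEvenOdd; infer_instance

-- ===== CLAIM (what is proved, stated in full; the proofs are below) =====
def Claim_equal_separateEvenOdd : Prop := ∀ (numbers : List Int), Dom_separateEvenOdd numbers → Spec_separateEvenOdd numbers (separateEvenOdd numbers)

-- ===== LEMMAS AND PROOFS =====
lemma foldl_add_init (l : List Int) (a : Int) :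
    l.foldl (· + ·) a = a + l.foldl (· + ·) 0 := by
  induction l generalizing a with
  | nil => simp
  | cons x xs ih =>
    simp only [List.foldl_cons]
    rw [ih, ih (0 + x)]; ring

lemma separateEvenOdd_foldl_state (numbers : List Int)
    (e o : List Int) (se so : Int) :
    numbers.foldl
      (fun (st : List Int × List Int × Int × Int) number =>
        if PySem.Int.mod number 2 = 0 then
          (st.1 ++ [number], st.2.1, st.2.2.1 + number, st.2.2.2)
        else
          (st.1, st.2.1 ++ [number], st.2.2.1, st.2.2.2 + number))
      (e, o, se, so)
    = (e ++ numbers.filter (fun n => PySem.Int.mod n 2 = 0),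
       o ++ numbers.filter (fun n => PySem.Int.mod n 2 ≠ 0),
       se + (numbers.filter (fun n => PySem.Int.mod n 2 = 0)).foldl (· + ·) 0,
       so + (numbers.filter (fun n => PySem.Int.mod n 2 ≠ 0)).foldl (· + ·) 0) := by
  induction numbers generalizing e o se so with
  | nil => simp
  | cons x xs ih =>
    by_cases hx : PySem.Int.mod x 2 = 0
    · have hf : (x :: xs).filter (fun n => PySem.Int.mod n 2 = 0)
          = x :: xs.filter (fun n => PySem.Int.mod n 2 = 0) := by
        simp only [List.filter_cons, hx, decide_true, if_true]
      have hg : (x :: xs).filter (fun n => PySem.Int.mod n 2 ≠ 0)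
          = xs.filter (fun n => PySem.Int.mod n 2 ≠ 0) := by
        simp only [List.filter_cons, ne_eq, hx, decide_true, decide_not, Bool.not_true, if_false,
          Bool.false_eq_true]
      rw [List.foldl_cons, if_pos hx, ih, hf, hg, List.foldl_cons,
        foldl_add_init _ (0 + x)]
      exact Prod.ext (by simp) (Prod.ext (by simp) (Prod.ext (by ring_nf) (by ring_nf)))
    · have hf : (x :: xs).filter (fun n => PySem.Int.mod n 2 = 0)
          = xs.filter (fun n => PySem.Int.mod n 2 = 0) := by
        simp only [List.filter_cons, hx, decide_false, if_false, Bool.false_eq_true]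
      have hg : (x :: xs).filter (fun n => PySem.Int.mod n 2 ≠ 0)
          = x :: xs.filter (fun n => PySem.Int.mod n 2 ≠ 0) := by
        simp only [List.filter_cons, ne_eq, hx, decide_false, decide_not, Bool.not_false, if_true]
      rw [List.foldl_cons, if_neg hx, ih, hf, hg, List.foldl_cons,
        foldl_add_init _ (0 + x)]
      exact Prod.ext (by simp) (Prod.ext (by simp) (Prod.ext (by ring_nf) (by ring_nf)))

-- ===== VERDICT (by name: the statement is the Claim_ definition above) =====
theorem separateEvenOdd_spec : Claim_equal_separateEvenOdd := by
  intro numbers _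
  unfold Spec_separateEvenOdd separateEvenOdd separateEvenOdd_alt
  simpa using separateEvenOdd_foldl_state numbers [] [] 0 0
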